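-- pv_equiv track=rewrite | github.com/alexognyanov1/TU | I-kurs/VP/ExampleTest/Test2/task1.py | find_index_of_min_element_with_remainder_4
-- ===== SOURCE A (Python) =====
-- def find_index_of_min_element_with_remainder_4(lst):
--     min_element = float('inf')
--     min_index = -1
--     for i, num in enumerate(lst):
--         if num % 6 == 4 and num < min_element:
--             min_element = num
--             min_index = i
--     return min_index
-- ===== SOURCE B (Python) =====
-- def find_index_of_min_element_with_remainder_4(lst):
--     pairs = [(num, i) for i, num in enumerate(lst) if num % 6 == 4]
--     return min(pairs)[1] if pairs else -1
-- ===== Notes on version B (the rewrite author's own statement) =====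
-- stated objective: simpler
-- what changed: Replaces the single-pass running-minimum accumulator (with an inf sentinel and explicit state updates) by a two-phase filter-then-reduce: build the (value, index) pairs of qualifying elements, then take min of that list (lexicographic tuple min reproduces the first-occurrence tie-break), returning -1 when no element qualifies.
import Mathlib
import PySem

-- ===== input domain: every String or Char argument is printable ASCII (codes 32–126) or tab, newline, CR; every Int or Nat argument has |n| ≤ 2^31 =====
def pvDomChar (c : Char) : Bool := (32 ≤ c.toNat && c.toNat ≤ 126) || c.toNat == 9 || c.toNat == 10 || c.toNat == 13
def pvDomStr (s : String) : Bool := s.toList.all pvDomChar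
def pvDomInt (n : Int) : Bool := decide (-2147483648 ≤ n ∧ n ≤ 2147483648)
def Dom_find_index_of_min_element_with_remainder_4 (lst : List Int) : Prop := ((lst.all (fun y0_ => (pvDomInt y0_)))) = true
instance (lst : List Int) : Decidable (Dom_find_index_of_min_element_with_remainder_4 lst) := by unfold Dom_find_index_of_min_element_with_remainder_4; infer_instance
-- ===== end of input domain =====

-- B replaces A's running-minimum accumulator loop by a filter-then-reduce: collect (value, index)
-- pairs of qualifying elements, then take the lexicographic minimum (objective: simpler).


-- ===== PORT A =====
-- min_element = float('inf') is modelled as `none` (every Int is < it); state is (min_element, min_index)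
def fimStepA (st : Option Int × Int) (p : Int × Int) : Option Int × Int :=
  if (PySem.Int.mod p.2 6 == 4 &&
      (match st.1 with | none => true | some m => decide (p.2 < m))) then (some p.2, p.1) else st

def find_index_of_min_element_with_remainder_4 (lst : List Int) : Int :=
  ((PySem.List.enumerate lst).foldl fimStepA (none, -1)).2

-- ===== PORT B =====
def find_index_of_min_element_with_remainder_4_alt (lst : List Int) : Int :=
  let pairs := (PySem.List.enumerate lst).filterMap
    (fun p => if PySem.Int.mod p.2 6 == 4 then some (p.2, p.1) else none)
  match PySem.List.min2? pairs (fun q => q.1) (fun q => q.2) with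
  | none => -1
  | some q => q.2

-- ===== PRECONDITION & SPEC =====
def Spec_find_index_of_min_element_with_remainder_4 (lst : List Int) (out : Int) : Prop := out = find_index_of_min_element_with_remainder_4_alt lst
instance (lst : List Int) (out : Int) : Decidable (Spec_find_index_of_min_element_with_remainder_4 lst out) := by unfold Spec_find_index_of_min_element_with_remainder_4; infer_instance

-- ===== CLAIM (what is proved, stated in full; the proofs are below) =====
def Claim_equal_find_index_of_min_element_with_remainder_4 : Prop := ∀ (lst : List Int), Dom_find_index_of_min_element_with_remainder_4 lst → Spec_find_index_of_min_element_with_remainder_4 lst (find_index_of_min_element_with_remainder_4 lst)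

-- ===== LEMMAS AND PROOFS =====

-- min2?'s internal fold step (first lexicographic minimum of (value, index) pairs)
def fimStepB (acc : Option (Int × Int)) (x : Int × Int) : Option (Int × Int) :=
  match acc with
  | none => some x
  | some m => if (decide (x.1 < m.1) || !decide (m.1 < x.1) && decide (x.2 < m.2)) = true then some x else some m

theorem fim_min2?_eq_foldl (xs : List (Int × Int)) :
    PySem.List.min2? xs (fun q => q.1) (fun q => q.2) = xs.foldl fimStepB none := by
  unfold PySem.List.min2?
  congr 1
  funext acc x
  cases acc <;> rfl

-- the relation between A's loop state and B's fold accumulator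
def fimR (st : Option Int × Int) (acc : Option (Int × Int)) : Prop :=
  (st = (none, -1) ∧ acc = none) ∨ (∃ v i, st = (some v, i) ∧ acc = some (v, i))

theorem fim_invariant (lst : List Int) : ∀ (k : Int) (st : Option Int × Int) (acc : Option (Int × Int)),
    fimR st acc → (∀ v i, acc = some (v, i) → i < k) →
    fimR ((PySem.List.enumerate lst k).foldl fimStepA st)
      (((PySem.List.enumerate lst k).filterMap
        (fun p => if PySem.Int.mod p.2 6 == 4 then some (p.2, p.1) else none)).foldl fimStepB acc) := by
  induction lst with
  | nil => intro k st acc hR _; simpa [PySem.List.enumerate_nil] using hR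
  | cons x rest ih =>
    intro k st acc hR hlt
    rw [PySem.List.enumerate_cons]
    by_cases hq : x % 6 = 4
    · -- x qualifies: it enters B's pair list; A's loop tests it against the running min
      have hqb : (PySem.Int.mod x 6 == 4) = true := by simp [hq]
      rcases hR with ⟨hst, hacc⟩ | ⟨v, i, hst, hacc⟩
      · -- no minimum yet: both take (x, k)
        subst hst; subst hacc
        have hA : fimStepA (none, -1) (k, x) = (some x, k) := by simp [fimStepA, hq]
        have hB : fimStepB none (x, k) = some (x, k) := rfl
        simp only [List.filterMap_cons, List.foldl_cons, hqb, if_pos, hA, hB]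
        exact ih (k + 1) _ _ (Or.inr ⟨x, k, rfl, rfl⟩) (by rintro v' i' ⟨rfl, rfl⟩; omega)
      · -- running minimum (v, i) with i < k
        subst hst; subst hacc
        have hik : i < k := hlt v i rfl
        by_cases hlt2 : x < v
        · -- strictly smaller: both replace by (x, k)
          have hA : fimStepA (some v, i) (k, x) = (some x, k) := by
            simp [fimStepA, hq, hlt2]
          have hB : fimStepB (some (v, i)) (x, k) = some (x, k) := by
            simp [fimStepB, hlt2]
          simp only [List.filterMap_cons, List.foldl_cons, hqb, if_pos, hA, hB]
          exact ih (k + 1) _ _ (Or.inr ⟨x, k, rfl, rfl⟩) (by rintro v' i' ⟨rfl, rfl⟩; omega)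
        · -- not smaller: A keeps (v, i); B keeps it too (ties lose on the larger index k > i)
          have hA : fimStepA (some v, i) (k, x) = (some v, i) := by
            simp [fimStepA, hlt2]
          have hB : fimStepB (some (v, i)) (x, k) = some (v, i) := by
            have hc : ¬ ((decide ((x, k).1 < (v, i).1) || !decide ((v, i).1 < (x, k).1) && decide ((x, k).2 < (v, i).2)) = true) := by
              simp; omega
            simp only [fimStepB]
            rw [if_neg hc]
          simp only [List.filterMap_cons, List.foldl_cons, hqb, if_pos, hA, hB]
          exact ih (k + 1) _ _ (Or.inr ⟨v, i, rfl, rfl⟩) (by rintro v' i' ⟨rfl, rfl⟩; omega)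
    · -- x does not qualify: skipped on both sides
      have hqb : (PySem.Int.mod x 6 == 4) = false := by simp [hq]
      have hA : fimStepA st (k, x) = st := by simp [fimStepA, hq]
      simp only [List.filterMap_cons, List.foldl_cons, hqb, Bool.false_eq_true,
        not_false_eq_true, if_neg, hA]
      refine ih (k + 1) _ _ hR ?_
      intro v' i' h
      have := hlt v' i' h
      omega

-- ===== VERDICT (by name: the statement is the Claim_ definition above) =====
theorem find_index_of_min_element_with_remainder_4_spec : Claim_equal_find_index_of_min_element_with_remainder_4 := by
  intro lst _
  unfold Spec_find_index_of_min_element_with_remainder_4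
  have h := fim_invariant lst 0 (none, -1) none (Or.inl ⟨rfl, rfl⟩) (by intro v i h; cases h)
  unfold find_index_of_min_element_with_remainder_4 find_index_of_min_element_with_remainder_4_alt
  simp only [fim_min2?_eq_foldl]
  rcases h with ⟨h1, h2⟩ | ⟨v, i, h1, h2⟩ <;> simp_all
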